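-- pv_equiv track=rewrite | github.com/kshmawj111/programmers | lv2/더 맵게.py | solution_sort
-- ===== SOURCE A (Python) =====
-- def solution_sort(scoville: list, K: int):
--     answer = 0
--     scoville.sort(reverse=True)
--
--     while len(scoville) > 1:
--         min_scoville = scoville.pop()
--         next_min_scoville = scoville.pop()
--         mixed_scoville = min_scoville + (next_min_scoville * 2)
--
--         scoville.append(mixed_scoville)
--         answer += 1
--
--         scoville.sort(reverse=True)
--
--         if scoville[-1] >= K:
--             break
--
--     if scoville[-1] < K:
--         return -1
--
--     else:
--         return answer
-- ===== SOURCE B (Python) =====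
-- def solution_sort(scoville: list, K: int):
--     # Two-queue merge: sort once; merged bowls go into a FIFO queue, and the two
--     # smallest bowls are always at the fronts of the two queues, so each mix is O(1).
--     base = sorted(scoville)
--     merged = []
--     i = j = 0          # front pointers of the two queues
--     count = 0
--     remaining = len(base)
--
--     def take_base():
--         # True iff the next-smallest live bowl sits in the base queue
--         return i < len(base) and (j >= len(merged) or base[i] <= merged[j])
--
--     def front():
--         return base[i] if take_base() else merged[j]
--
--     while remaining > 1:
--         if take_base():
--             a = base[i]; i += 1
--         else:
--             a = merged[j]; j += 1
--         if take_base():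
--             b = base[i]; i += 1
--         else:
--             b = merged[j]; j += 1
--         merged.append(a + 2 * b)
--         remaining -= 1
--         count += 1
--         if front() >= K:
--             break
--
--     if front() < K:
--         return -1
--     return count
-- ===== Notes on version B (the rewrite author's own statement) =====
-- stated objective: faster
-- what changed: B replaces A's full re-sort of the whole list after every merge by the two-queue technique: one initial sort plus a FIFO queue of merged values whose fronts always hold the two smallest bowls, making each merge O(1).
import Mathlib
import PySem

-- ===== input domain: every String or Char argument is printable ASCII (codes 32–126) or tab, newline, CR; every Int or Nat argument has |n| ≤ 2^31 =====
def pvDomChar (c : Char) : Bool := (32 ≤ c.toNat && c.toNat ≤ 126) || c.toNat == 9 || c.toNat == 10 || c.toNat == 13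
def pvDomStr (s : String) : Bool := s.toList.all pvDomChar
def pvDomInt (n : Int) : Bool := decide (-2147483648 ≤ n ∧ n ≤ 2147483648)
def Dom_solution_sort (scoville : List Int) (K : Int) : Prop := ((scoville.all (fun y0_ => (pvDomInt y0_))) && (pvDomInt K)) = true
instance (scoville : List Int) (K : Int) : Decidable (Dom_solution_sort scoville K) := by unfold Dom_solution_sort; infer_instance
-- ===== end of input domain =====

-- B replaces A's full re-sort after every merge by the two-queue technique (one initial
-- sort plus a FIFO queue of merged values). A sorts/pops the caller's list in place, B
-- does not; the equivalence proved here is about the return value only.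

-- ===== PORT A =====
-- scoville.sort(reverse=True)
def sortDesc (l : List Int) : List Int := PySem.List.sorted l (fun x => x) true

-- the while-loop of A; fuel only makes the recursion structural (length decreases by 1
-- per iteration and the loop needs at most `length` steps, so fuel = length is exact)
def aLoop (K : Int) : Nat → List Int → Int → List Int × Int
  | 0, l, answer => (l, answer)
  | fuel + 1, l, answer =>
    if l.length > 1 then
      let min_scoville := l.getLast!
      let l1 := l.dropLast
      let next_min_scoville := l1.getLast!
      let l2 := l1.dropLast
      let mixed_scoville := min_scoville + next_min_scoville * 2
      let l3 := sortDesc (l2 ++ [mixed_scoville])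
      if l3.getLast! ≥ K then (l3, answer + 1)
      else aLoop K fuel l3 (answer + 1)
    else (l, answer)

def solution_sort (scoville : List Int) (K : Int) : Int :=
  let l := sortDesc scoville
  let p := aLoop K l.length l 0
  if p.1.getLast! < K then -1 else p.2

-- ===== PORT B =====
-- Source B keeps index pointers i, j into `base` and `merged`; the ports keep the live
-- suffixes base[i:], merged[j:] as lists consumed at the head, which are the same values.
-- Source B's pop of the smaller front (take_base() test, then advance one pointer):
def qpop : List Int → List Int → Int × List Int × List Int
  | x :: bs, y :: ms => if x ≤ y then (x, bs, y :: ms) else (y, x :: bs, ms)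
  | x :: bs, [] => (x, bs, [])
  | [], y :: ms => (y, [], ms)
  | [], [] => (0, [], [])    -- Python raises IndexError here; unreachable under Pre_

-- Source B's front():
def qfront : List Int → List Int → Int
  | x :: _, y :: _ => if x ≤ y then x else y
  | x :: _, [] => x
  | [], y :: _ => y
  | [], [] => 0              -- Python raises IndexError here; unreachable under Pre_

-- the while-loop of Source B; remaining = B.length + M.length, fuel = initial length is exact
def bLoop (K : Int) : Nat → List Int → List Int → Int → List Int × List Int × Int
  | 0, B, M, c => (B, M, c)
  | fuel + 1, B, M, c =>
    if B.length + M.length > 1 then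
      let p1 := qpop B M
      let p2 := qpop p1.2.1 p1.2.2
      let M3 := p2.2.2 ++ [p1.1 + 2 * p2.1]
      if qfront p2.2.1 M3 ≥ K then (p2.2.1, M3, c + 1)
      else bLoop K fuel p2.2.1 M3 (c + 1)
    else (B, M, c)

def solution_sort_alt (scoville : List Int) (K : Int) : Int :=
  let base := PySem.List.sorted scoville (fun x => x) false
  let r := bLoop K base.length base [] 0
  if qfront r.1 r.2.1 < K then -1 else r.2.2

-- ===== PRECONDITION & SPEC =====
-- Pre_ excludes only the empty list, on which A raises IndexError at scoville[-1]
-- (and B raises IndexError at merged[j]).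
def Pre_solution_sort (scoville : List Int) (K : Int) : Prop := scoville ≠ []
instance (scoville : List Int) (K : Int) : Decidable (Pre_solution_sort scoville K) := by
  unfold Pre_solution_sort; infer_instance
def pvWitness_solution_sort : List Int × Int := ([1, 2], 3)

def Spec_solution_sort (scoville : List Int) (K : Int) (out : Int) : Prop :=
  out = solution_sort_alt scoville K
instance (scoville : List Int) (K : Int) (out : Int) : Decidable (Spec_solution_sort scoville K out) := by
  unfold Spec_solution_sort; infer_instance

-- ===== CLAIM (what is proved, stated in full; the proofs are below) =====
def Claim_equal_solution_sort : Prop := ∀ (scoville : List Int) (K : Int), Dom_solution_sort scoville K → Pre_solution_sort scoville K → Spec_solution_sort scoville K (solution_sort scoville K)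

-- ===== LEMMAS AND PROOFS =====

-- the queue invariant: after the two pops, every still-live merged value is at most
-- the value about to be appended
def Qpred (B M : List Int) : Prop :=
  ∀ m ∈ (qpop (qpop B M).2.1 (qpop B M).2.2).2.2,
    m ≤ (qpop B M).1 + 2 * (qpop (qpop B M).2.1 (qpop B M).2.2).1

theorem qfront_eq_qpop_fst (B M : List Int) : qfront B M = (qpop B M).1 := by
  cases B <;> cases M <;> simp [qfront, qpop] <;> split <;> rfl

theorem qpop_perm (B M : List Int) (h : B ++ M ≠ []) :
    ((qpop B M).1 :: ((qpop B M).2.1 ++ (qpop B M).2.2)).Perm (B ++ M) := by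
  cases B with
  | nil =>
    cases M with
    | nil => simp at h
    | cons y ms => simp [qpop]
  | cons x bs =>
    cases M with
    | nil => simp [qpop]
    | cons y ms =>
      simp only [qpop]
      split
      · simp
      · exact (List.perm_middle (a := y) (l₁ := x :: bs) (l₂ := ms)).symm

theorem qpop_min (B M : List Int) (hB : B.Pairwise (· ≤ ·)) (hM : M.Pairwise (· ≤ ·)) :
    ∀ x ∈ B ++ M, (qpop B M).1 ≤ x := by
  cases B with
  | nil =>
    cases M with
    | nil => simp
    | cons y ms =>
      intro x hx
      rcases (by simpa using hx : x = y ∨ x ∈ ms) with rfl | hx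
      · simp [qpop]
      · simpa [qpop] using (List.pairwise_cons.mp hM).1 x hx
  | cons b bs =>
    cases M with
    | nil =>
      intro x hx
      rcases (by simpa using hx : x = b ∨ x ∈ bs) with rfl | hx
      · simp [qpop]
      · simpa [qpop] using (List.pairwise_cons.mp hB).1 x hx
    | cons y ms =>
      intro x hx
      simp only [qpop]
      split
      · rename_i hxy
        rcases (by simpa using hx : x = b ∨ x ∈ bs ∨ x = y ∨ x ∈ ms) with rfl | hx | rfl | hx
        · exact le_refl _
        · exact (List.pairwise_cons.mp hB).1 x hx
        · exact hxy
        · exact le_trans hxy ((List.pairwise_cons.mp hM).1 x hx)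
      · rename_i hxy
        push_neg at hxy
        rcases (by simpa using hx : x = b ∨ x ∈ bs ∨ x = y ∨ x ∈ ms) with rfl | hx | rfl | hx
        · exact le_of_lt hxy
        · exact le_trans (le_of_lt hxy) ((List.pairwise_cons.mp hB).1 x hx)
        · exact le_refl _
        · exact (List.pairwise_cons.mp hM).1 x hx

theorem qpop_base_cases (B M : List Int) :
    (qpop B M).2.1 = B ∨ (qpop B M).2.1 = B.tail := by
  cases B <;> cases M <;> simp [qpop] <;> split <;> simp

theorem qpop_merged_cases (B M : List Int) :
    (qpop B M).2.2 = M ∨ (qpop B M).2.2 = M.tail := by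
  cases B <;> cases M <;> simp [qpop] <;> split <;> simp

theorem pairwise_of_qpop_base {B M : List Int} (hB : B.Pairwise (· ≤ ·)) :
    (qpop B M).2.1.Pairwise (· ≤ ·) := by
  rcases qpop_base_cases B M with h | h <;> rw [h]
  · exact hB
  · exact hB.tail

theorem pairwise_of_qpop_merged {B M : List Int} (hM : M.Pairwise (· ≤ ·)) :
    (qpop B M).2.2.Pairwise (· ≤ ·) := by
  rcases qpop_merged_cases B M with h | h <;> rw [h]
  · exact hM
  · exact hM.tail

-- popping the queues pops exactly the head of the sorted remaining multiset
theorem pop_head {t B M : List Int} {h : Int}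
    (ht : (h :: t).Pairwise (· ≤ ·)) (hperm : (h :: t).Perm (B ++ M))
    (hB : B.Pairwise (· ≤ ·)) (hM : M.Pairwise (· ≤ ·)) :
    (qpop B M).1 = h ∧ ((qpop B M).2.1 ++ (qpop B M).2.2).Perm t := by
  have hne : B ++ M ≠ [] := fun hn => by simp [hn] at hperm
  have hp := qpop_perm B M hne
  have ha_mem : (qpop B M).1 ∈ h :: t := hperm.symm.subset (hp.subset (List.mem_cons_self))
  have h_mem : h ∈ B ++ M := hperm.subset List.mem_cons_self
  have h1 : h ≤ (qpop B M).1 := by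
    rcases List.mem_cons.mp ha_mem with he | hm
    · exact le_of_eq he.symm
    · exact (List.pairwise_cons.mp ht).1 _ hm
  have h2 : (qpop B M).1 ≤ h := qpop_min B M hB hM h h_mem
  have heq : (qpop B M).1 = h := le_antisymm h2 h1
  refine ⟨heq, ?_⟩
  have : ((qpop B M).1 :: ((qpop B M).2.1 ++ (qpop B M).2.2)).Perm (h :: t) :=
    hp.trans hperm.symm
  rw [heq] at this
  exact this.cons_inv

theorem qpred_nil (B : List Int) : Qpred B [] := by
  intro m hm
  rcases qpop_merged_cases B [] with h | h <;>
    rcases qpop_merged_cases (qpop B []).2.1 (qpop B []).2.2 with h2 | h2 <;>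
      rw [h2, h] at hm <;> simp at hm

-- preservation of the queue invariant across one merge
theorem qstep (B M : List Int) (a b : Int) (hab : a ≤ b)
    (hlow : ∀ x ∈ B ++ M, b ≤ x) (hM : ∀ m ∈ M, m ≤ a + 2 * b) :
    Qpred B (M ++ [a + 2 * b]) := by
  unfold Qpred
  rcases B with _ | ⟨x1, bs⟩
  · rcases M with _ | ⟨m1, ms⟩
    · simp [qpop]
    · rcases ms with _ | ⟨m2, ms2⟩
      · simp [qpop]
      · have hb1 : b ≤ m1 := hlow m1 (by simp)
        have hb2 : b ≤ m2 := hlow m2 (by simp)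
        simp only [List.cons_append, List.nil_append, qpop]
        intro m hm
        rcases List.mem_append.mp hm with h | h
        · have := hM m (by simp [h]); omega
        · simp at h; omega
  · have hb1 : b ≤ x1 := hlow x1 (by simp)
    rcases M with _ | ⟨m1, ms⟩
    · -- M = []
      simp only [List.append_nil, List.nil_append, qpop]
      split_ifs with h1
      · rcases bs with _ | ⟨x2, bs2⟩
        · simp [qpop]
        · have hb2 : b ≤ x2 := hlow x2 (by simp)
          simp only [qpop]
          split_ifs with h2
          · intro m hm; simp at hm; omega
          · simp [qpop]
      · simp [qpop]
    · -- B = x1::bs, M = m1::ms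
      have hm1 : b ≤ m1 := hlow m1 (by simp)
      simp only [List.cons_append, qpop]
      split_ifs with h1
      · -- pop1 took x1; second pop from (bs, m1::ms++[v])
        rcases bs with _ | ⟨x2, bs2⟩
        · simp only [qpop]
          intro m hm
          rcases List.mem_append.mp hm with h | h
          · have := hM m (by simp [h]); omega
          · simp at h; omega
        · have hb2 : b ≤ x2 := hlow x2 (by simp)
          simp only [qpop]
          split_ifs with h2
          · intro m hm
            rcases (by simpa using hm : m = m1 ∨ m ∈ ms ∨ m = a + 2 * b) with rfl | h | rfl
            · have := hM m (by simp); omega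
            · have := hM m (by simp [h]); omega
            · omega
          · intro m hm
            rcases List.mem_append.mp hm with h | h
            · have := hM m (by simp [h]); omega
            · simp at h; omega
      · -- pop1 took m1; second pop from (x1::bs, ms++[v])
        rcases ms with _ | ⟨m2, ms2⟩
        · simp only [List.nil_append, qpop]
          split_ifs with h2
          · intro m hm; simp at hm; omega
          · simp [qpop]
        · have hm2 : b ≤ m2 := hlow m2 (by simp)
          simp only [List.cons_append, qpop]
          split_ifs with h2
          · intro m hm
            rcases (by simpa using hm : m = m2 ∨ m ∈ ms2 ∨ m = a + 2 * b) with rfl | h | rfl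
            · have := hM m (by simp); omega
            · have := hM m (by simp [h]); omega
            · omega
          · intro m hm
            rcases List.mem_append.mp hm with h | h
            · have := hM m (by simp [h]); omega
            · simp at h; omega

-- sortDesc is the ascending sort reversed
theorem sortDesc_eq_reverse (l : List Int) :
    sortDesc l = (PySem.List.sorted l (fun x => x) false).reverse := by
  refine List.Perm.eq_of_pairwise (le := fun a b : Int => b ≤ a)
    (fun a b _ _ h1 h2 => le_antisymm h2 h1) ?_ ?_ ?_
  · exact PySem.List.sorted_pairwise_rev l (fun x => x)
  · exact List.pairwise_reverse.mpr (by simpa using PySem.List.sorted_pairwise l (fun x => x))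
  · exact (PySem.List.sorted_perm l _ true).trans
      (((PySem.List.sorted_perm l (fun x => x) false)).symm.trans (List.reverse_perm _).symm)

theorem getLast!_concat' (l : List Int) (x : Int) : (l ++ [x]).getLast! = x := by
  simp

theorem getLast!_reverse' (m : List Int) (h : m ≠ []) : m.reverse.getLast! = m.head! := by
  cases m with
  | nil => simp at h
  | cons a t => simpa using getLast!_concat' t.reverse a

-- the front of the queues is the head of the sorted remaining multiset
theorem head!_eq_qfront {t B M : List Int}
    (ht : t.Pairwise (· ≤ ·)) (hperm : t.Perm (B ++ M))
    (hB : B.Pairwise (· ≤ ·)) (hM : M.Pairwise (· ≤ ·)) (hne : t ≠ []) :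
    t.head! = qfront B M := by
  cases t with
  | nil => simp at hne
  | cons h tt =>
    rw [qfront_eq_qpop_fst]
    simpa using (pop_head ht hperm hB hM).1.symm

-- the synchronisation invariant: A's sorted-descending list is the reverse of a sorted
-- list permuting the two live queues of B, and the queue invariant holds
theorem sync (K : Int) : ∀ (fuel : Nat) (s B M : List Int) (ans : Int),
    s.Pairwise (· ≤ ·) → B.Pairwise (· ≤ ·) → M.Pairwise (· ≤ ·) →
    s.Perm (B ++ M) → Qpred B M → s ≠ [] →
    ∃ t : List Int, t.Pairwise (· ≤ ·) ∧
      t.Perm ((bLoop K fuel B M ans).1 ++ (bLoop K fuel B M ans).2.1) ∧ t ≠ [] ∧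
      (bLoop K fuel B M ans).1.Pairwise (· ≤ ·) ∧
      (bLoop K fuel B M ans).2.1.Pairwise (· ≤ ·) ∧
      aLoop K fuel s.reverse ans = (t.reverse, (bLoop K fuel B M ans).2.2) := by
  intro fuel
  induction fuel with
  | zero =>
    intro s B M ans hs hB hM hperm hQ hne
    exact ⟨s, hs, by simpa [bLoop] using hperm, hne, by simpa [bLoop] using hB,
      by simpa [bLoop] using hM, by simp [aLoop, bLoop]⟩
  | succ f ih =>
    intro s B M ans hs hB hM hperm hQ hne
    by_cases hlen : 1 < s.length
    · -- the loop iterates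
      rcases s with _ | ⟨s0, s⟩
      · simp at hlen
      rcases s with _ | ⟨s1, rest⟩
      · simp at hlen
      have hlenB : 1 < B.length + M.length := by
        rw [← List.length_append, ← hperm.length_eq]; exact hlen
      -- the two pops are s0 and s1
      have hB1 := pairwise_of_qpop_base (M := M) hB
      have hM1 := pairwise_of_qpop_merged (B := B) hM
      obtain ⟨ha, hperm1⟩ := pop_head hs hperm hB hM
      have hs1 : (s1 :: rest).Pairwise (· ≤ ·) := (List.pairwise_cons.mp hs).2
      obtain ⟨hb, hperm2⟩ :=
        pop_head (B := (qpop B M).2.1) (M := (qpop B M).2.2) hs1 hperm1.symm hB1 hM1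
      have hB2 := pairwise_of_qpop_base (M := (qpop B M).2.2) hB1
      have hM2 := pairwise_of_qpop_merged (B := (qpop B M).2.1) hM1
      have hab : s0 ≤ s1 := (List.pairwise_cons.mp hs).1 s1 (by simp)
      have hQrw : ∀ m ∈ (qpop (qpop B M).2.1 (qpop B M).2.2).2.2, m ≤ s0 + s1 * 2 := by
        intro m hm
        have := hQ m hm
        rw [ha, hb] at this
        omega
      have hlow : ∀ x ∈ (qpop (qpop B M).2.1 (qpop B M).2.2).2.1 ++
          (qpop (qpop B M).2.1 (qpop B M).2.2).2.2, s1 ≤ x := by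
        intro x hx
        exact (List.pairwise_cons.mp hs1).1 x (hperm2.subset hx)
      have hQ' : Qpred (qpop (qpop B M).2.1 (qpop B M).2.2).2.1
          ((qpop (qpop B M).2.1 (qpop B M).2.2).2.2 ++ [s0 + s1 * 2]) := by
        have h := qstep _ _ s0 s1 hab hlow (by intro m hm; have := hQrw m hm; omega)
        rw [show s0 + 2 * s1 = s0 + s1 * 2 by ring] at h
        exact h
      -- abbreviations for the post-merge state
      set B2 := (qpop (qpop B M).2.1 (qpop B M).2.2).2.1 with hB2def
      set M3 := (qpop (qpop B M).2.1 (qpop B M).2.2).2.2 ++ [s0 + s1 * 2] with hM3def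
      have hM3p : M3.Pairwise (· ≤ ·) := by
        rw [hM3def]
        refine List.pairwise_append.mpr ⟨hM2, by simp, ?_⟩
        intro m hm y hy
        rw [List.mem_singleton] at hy
        subst hy
        exact hQrw m hm
      -- the B-side step
      have hBL : bLoop K (f + 1) B M ans =
          (if qfront B2 M3 ≥ K then (B2, M3, ans + 1) else bLoop K f B2 M3 (ans + 1)) := by
        simp only [bLoop]
        rw [if_pos hlenB, ha, hb, hM3def, hB2def]
        ring_nf
      -- the A-side step
      set t' := PySem.List.sorted (rest.reverse ++ [s0 + s1 * 2]) (fun x => x) false with ht'def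
      have ht'p : t'.Pairwise (· ≤ ·) := by
        simpa using PySem.List.sorted_pairwise (rest.reverse ++ [s0 + s1 * 2]) (fun x => x)
      have ht'ne : t' ≠ [] := by
        rw [ht'def, Ne, PySem.List.sorted_eq_nil_iff]
        simp
      have ht'perm : t'.Perm (B2 ++ M3) := by
        rw [hM3def, ← List.append_assoc]
        refine (PySem.List.sorted_perm _ _ _).trans ?_
        exact ((rest.reverse_perm).trans hperm2.symm).append_right _
      have hl3 : sortDesc (rest.reverse ++ [s0 + s1 * 2]) = t'.reverse := by
        rw [ht'def, sortDesc_eq_reverse]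
      have hfront : (sortDesc (rest.reverse ++ [s0 + s1 * 2])).getLast! = qfront B2 M3 := by
        rw [hl3, getLast!_reverse' _ ht'ne]
        exact head!_eq_qfront ht'p ht'perm hB2 hM3p ht'ne
      have hrev : (s0 :: s1 :: rest).reverse = (rest.reverse ++ [s1]) ++ [s0] := by simp
      have hA : aLoop K (f + 1) (s0 :: s1 :: rest).reverse ans =
          (if qfront B2 M3 ≥ K then (t'.reverse, ans + 1)
            else aLoop K f t'.reverse (ans + 1)) := by
        rw [hrev]
        simp only [aLoop]
        rw [if_pos (by simp)]
        simp only [getLast!_concat', List.dropLast_concat]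
        rw [hfront, hl3]
      rw [hA, hBL]
      by_cases hK : qfront B2 M3 ≥ K
      · refine ⟨t', ht'p, ?_, ht'ne, ?_, ?_, ?_⟩
        · rw [if_pos hK]; exact ht'perm
        · rw [if_pos hK]; exact hB2
        · rw [if_pos hK]; exact hM3p
        · rw [if_pos hK, if_pos hK]
      · obtain ⟨t, h1, h2, h3, h4, h5, h6⟩ := ih t' B2 M3 (ans + 1) ht'p hB2 hM3p ht'perm hQ' ht'ne
        refine ⟨t, h1, ?_, h3, ?_, ?_, ?_⟩
        · rw [if_neg hK]; exact h2
        · rw [if_neg hK]; exact h4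
        · rw [if_neg hK]; exact h5
        · rw [if_neg hK, if_neg hK]; exact h6
    · -- the loop does not iterate
      have hlb : ¬ 1 < B.length + M.length := by
        rw [← List.length_append, ← hperm.length_eq]; exact hlen
      refine ⟨s, hs, ?_, hne, ?_, ?_, ?_⟩
      · simpa [bLoop, if_neg hlb] using hperm
      · simpa [bLoop, if_neg hlb] using hB
      · simpa [bLoop, if_neg hlb] using hM
      · simp [aLoop, bLoop, if_neg hlb, hlen]

theorem solution_sort_spec : Claim_equal_solution_sort := by
  intro scoville K _ hpre
  show solution_sort scoville K = solution_sort_alt scoville K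
  have hsd := sortDesc_eq_reverse scoville
  set s := PySem.List.sorted scoville (fun x => x) false with hsdef
  have hsne : s ≠ [] := fun h => hpre ((PySem.List.sorted_eq_nil_iff _ _ _).mp h)
  have hsp : s.Pairwise (· ≤ ·) := by
    simpa using PySem.List.sorted_pairwise scoville (fun x => x)
  obtain ⟨t, htp, htperm, htne, hBp, hMp, heq⟩ :=
    sync K s.length s s [] 0 hsp hsp (by simp) (by simp) (qpred_nil s) hsne
  have hfin : t.head! = qfront (bLoop K s.length s [] 0).1 (bLoop K s.length s [] 0).2.1 :=
    head!_eq_qfront htp htperm hBp hMp htne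
  simp only [solution_sort, solution_sort_alt, hsd, ← hsdef, List.length_reverse, heq,
    getLast!_reverse' _ htne, hfin]
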